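-- pv_equiv track=rewrite | github.com/jvmaiscedo/ADS | trilhosNovamente.py | rearrange_trains
-- ===== SOURCE A (Python) =====
-- class Stack:
--     def __init__(self):
--         self.items = []
--
--     def push(self, item):
--         self.items.append(item)
--
--     def pop(self):
--         if not self.isEmpty():
--             return self.items.pop()
--         else:
--             raise IndexError("A pilha está vazia.")
--
--     def peek(self):
--         if not self.isEmpty():
--             return self.items[-1]
--         else:
--             raise IndexError("A pilha está vazia.")
--
--     def isEmpty(self):
--         return len(self.items) == 0
--
--     def size(self):
--         return len(self.items)
--
-- def rearrange_trains(A, B):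
--     station = Stack()
--     output_sequence = []
--
--     while B:
--         if not station.isEmpty() and station.peek() == B[0]:
--             output_sequence.append("R")
--             station.pop()
--             B.pop(0)
--         else:
--             if A:
--                 output_sequence.append("I")
--                 station.push(A.pop(0))
--             else:
--                 return "".join(output_sequence)+" Impossible"
--     return "".join(output_sequence)
-- ===== SOURCE B (Python) =====
-- def rearrange_trains(A, B):
--     station = []
--     moves = []
--     while B:
--         b = B[0]
--         if station and station[-1] == b:
--             moves.append("R")
--             station.pop()
--             B.pop(0)
--         elif b in A:
--             k = A.index(b)
--             moves.append("I" * (k + 1) + "R")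
--             station.extend(A[:k])
--             del A[:k + 1]
--             B.pop(0)
--         else:
--             moves.append("I" * len(A))
--             station.extend(A)
--             del A[:]
--             return "".join(moves) + " Impossible"
--     return "".join(moves)
-- ===== Notes on version B (the rewrite author's own statement) =====
-- stated objective: alternative
-- what changed: Instead of simulating one push/pop decision per loop iteration, B serves each target B[0] in one step: it either pops a matching stack top, or locates the target in A with index() and transfers the whole prefix A[:k] to the stack at once, emitting the 'I'*(k+1)+'R' chunk as a single string; impossibility is detected by a membership test (b not on top and b not in A) rather than by exhausting A one push at a time.
import Mathlib
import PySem

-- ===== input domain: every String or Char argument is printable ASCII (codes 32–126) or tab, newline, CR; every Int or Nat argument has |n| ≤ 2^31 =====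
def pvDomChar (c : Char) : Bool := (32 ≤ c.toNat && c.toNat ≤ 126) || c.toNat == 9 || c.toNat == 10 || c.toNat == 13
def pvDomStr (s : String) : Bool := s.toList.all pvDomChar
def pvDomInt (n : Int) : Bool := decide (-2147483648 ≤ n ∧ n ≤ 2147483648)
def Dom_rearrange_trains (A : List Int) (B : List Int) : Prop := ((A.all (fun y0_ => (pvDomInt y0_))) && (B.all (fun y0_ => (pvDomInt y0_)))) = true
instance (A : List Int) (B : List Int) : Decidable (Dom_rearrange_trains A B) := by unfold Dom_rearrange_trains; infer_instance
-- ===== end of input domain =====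

-- B serves each target of B in a single step (pop a matching top, or an index() scan of A
-- transferring the prefix wholesale) instead of A's one-push-per-iteration simulation
-- (objective: alternative decomposition, same cost). B also mutates A and B in place like A;
-- the equivalence proved here is about the return value.


-- ===== PORT A =====
-- station is Stack.items with the TOP at the head of the list (push = cons, peek/pop = head);
-- output_sequence is the list of appended move strings, joined at the end as in Python.
def goA (A : List Int) (B : List Int) (station : List Int) (out : List String) : String :=
  match B with
  | [] => String.join out
  | b :: B' =>
    match station with
    | s :: st' =>
      if s = b then
        goA A B' st' (out ++ ["R"])
      else
        match A with
        | a :: A' => goA A' (b :: B') (a :: s :: st') (out ++ ["I"])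
        | [] => String.join out ++ " Impossible"
    | [] =>
      match A with
      | a :: A' => goA A' (b :: B') [a] (out ++ ["I"])
      | [] => String.join out ++ " Impossible"
termination_by A.length + B.length
decreasing_by all_goals (simp; try omega)

def rearrange_trains (A : List Int) (B : List Int) : String :=
  goA A B [] []

-- ===== PORT B =====
-- "I" * n  (Python string repetition; exact: n copies of "I" concatenated)
def strRepeat (s : String) (n : Nat) : String := String.join (List.replicate n s)

-- one iteration of B's while loop per element of B; station again with TOP at head,
-- so station.extend(A[:k]) is (A.take k).reverse ++ station.
def goB (A : List Int) (B : List Int) (station : List Int) (moves : List String) : String :=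
  match B with
  | [] => String.join moves
  | b :: B' =>
    if station.head? = some b then
      goB A B' station.tail (moves ++ ["R"])
    else
      match PySem.List.index? A b with
      | some k =>
          goB (A.drop (k + 1)) B' ((A.take k).reverse ++ station)
              (moves ++ [strRepeat "I" (k + 1) ++ "R"])
      | none => String.join (moves ++ [strRepeat "I" A.length]) ++ " Impossible"
termination_by B.length

def rearrange_trains_alt (A : List Int) (B : List Int) : String :=
  goB A B [] []

-- ===== PRECONDITION & SPEC =====
def Spec_rearrange_trains (A : List Int) (B : List Int) (out : String) : Prop := out = rearrange_trains_alt A B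
instance (A : List Int) (B : List Int) (out : String) : Decidable (Spec_rearrange_trains A B out) := by unfold Spec_rearrange_trains; infer_instance

-- ===== CLAIM (what is proved, stated in full; the proofs are below) =====
def Claim_equal_rearrange_trains : Prop := ∀ (A : List Int) (B : List Int), Dom_rearrange_trains A B → Spec_rearrange_trains A B (rearrange_trains A B)

-- ===== LEMMAS AND PROOFS =====
theorem foldl_append_str (l : List String) : ∀ (s : String), l.foldl (·++·) s = s ++ l.foldl (·++·) "" := by
  induction l with
  | nil => simp
  | cons a t ih => intro s; simp only [List.foldl_cons]; rw [ih, ih ("" ++ a)]; simp [String.append_assoc]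

theorem join_singleton (s : String) : String.join [s] = s := by simp [String.join]

theorem join_append (xs ys : List String) : String.join (xs ++ ys) = String.join xs ++ String.join ys := by
  simp [String.join, List.foldl_append]; rw [foldl_append_str]

-- A's push phase from a non-matching top: goA pushes from A until the first occurrence of b
theorem goA_push (b : Int) (B' : List Int) :
    ∀ (A station : List Int) (out : List String), station.head? ≠ some b →
    goA A (b :: B') station out =
      match PySem.List.index? A b with
      | some k => goA (A.drop (k + 1)) B' ((A.take k).reverse ++ station)
                      (out ++ List.replicate (k + 1) "I" ++ ["R"])
      | none => String.join (out ++ List.replicate A.length "I") ++ " Impossible" := by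
  intro A
  induction A with
  | nil =>
    intro station out h
    cases station with
    | nil => simp [goA, PySem.List.index?]
    | cons s st' =>
      have hs : s ≠ b := by simpa using h
      simp [goA, hs, PySem.List.index?]
  | cons a A' ih =>
    intro station out h
    have step : goA (a :: A') (b :: B') station out
        = goA A' (b :: B') (a :: station) (out ++ ["I"]) := by
      cases station with
      | nil => simp [goA]
      | cons s st' =>
        have hs : s ≠ b := by simpa using h
        simp [goA, hs]
    rw [step]
    by_cases hab : a = b
    · subst hab
      rw [PySem.List.index?_cons_self]
      have h2 : goA A' (a :: B') (a :: station) (out ++ ["I"])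
          = goA A' B' station (out ++ ["I"] ++ ["R"]) := by
        rw [goA.eq_def]; simp
      rw [h2]; simp [List.replicate]
    · rw [PySem.List.index?_cons_of_ne A' hab]
      rw [ih (a :: station) (out ++ ["I"]) (by simpa using hab)]
      cases hk : PySem.List.index? A' b with
      | none => simp [List.replicate_succ]
      | some k =>
        simp only [Option.map_some]
        simp [List.replicate_succ]

-- main loop correspondence: same joined prefix ⇒ same result
theorem goA_eq_goB (B : List Int) :
    ∀ (A station : List Int) (out moves : List String),
    String.join out = String.join moves →
    goA A B station out = goB A B station moves := by
  induction B with
  | nil => intro A station out moves hj; cases station <;> simp [goA, goB, hj]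
  | cons b B' ih =>
    intro A station out moves hj
    by_cases htop : station.head? = some b
    · cases station with
      | nil => simp at htop
      | cons s st' =>
        have hs : s = b := by simpa using htop
        subst hs
        have hA : goA A (s :: B') (s :: st') out = goA A B' st' (out ++ ["R"]) := by
          rw [goA.eq_def]; simp
        rw [hA]
        rw [goB.eq_def]; simp only [List.head?_cons, List.tail_cons, if_pos]
        exact ih A st' _ _ (by simp [join_append, hj])
    · rw [goA_push b B' A station out htop]
      rw [goB.eq_def]
      simp only []
      rw [if_neg htop]
      cases hk : PySem.List.index? A b with
      | none => simp [join_append, join_singleton, hj, strRepeat]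
      | some k =>
        exact ih _ _ _ _ (by simp [join_append, join_singleton, hj, strRepeat])

-- ===== VERDICT (by name: the statement is the Claim_ definition above) =====
theorem rearrange_trains_spec : Claim_equal_rearrange_trains := by
  intro A B _
  unfold Spec_rearrange_trains rearrange_trains rearrange_trains_alt
  exact goA_eq_goB B A [] [] [] rfl
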